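-- pv_equiv track=rewrite | github.com/ShiNera01/Algorithm | 프로그래머스_python/연습문제/level2/124 나라의 숫자.py | solution
-- ===== SOURCE A (Python) =====
-- def solution(n):
--     answer = ''
--
--     number = n
--
--     while number != 0:
--         number_2 = number % 3
--         if number_2 == 0:
--             number = number // 3 - 1
--         else:
--             number = number // 3
--
--         if number_2 == 1:
--             answer += str(1)
--         elif number_2 == 2:
--             answer += str(2)
--         else :
--             answer += str(4)
--
--     answer = answer[::-1]
--
--     return answer
-- ===== SOURCE B (Python) =====
-- def solution(n):
--     if n == 0:
--         return ''
--     r = n % 3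
--     if r == 0:
--         return solution(n // 3 - 1) + '4'
--     return solution(n // 3) + ('1' if r == 1 else '2')
-- ===== Notes on version B (the rewrite author's own statement) =====
-- stated objective: simpler
-- what changed: Replaced the while-loop that accumulates digits least-significant-first and then reverses the string by a direct recursion on the quotient that builds the answer most-significant-first, eliminating the reversal and the mutable accumulator.
import Mathlib
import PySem

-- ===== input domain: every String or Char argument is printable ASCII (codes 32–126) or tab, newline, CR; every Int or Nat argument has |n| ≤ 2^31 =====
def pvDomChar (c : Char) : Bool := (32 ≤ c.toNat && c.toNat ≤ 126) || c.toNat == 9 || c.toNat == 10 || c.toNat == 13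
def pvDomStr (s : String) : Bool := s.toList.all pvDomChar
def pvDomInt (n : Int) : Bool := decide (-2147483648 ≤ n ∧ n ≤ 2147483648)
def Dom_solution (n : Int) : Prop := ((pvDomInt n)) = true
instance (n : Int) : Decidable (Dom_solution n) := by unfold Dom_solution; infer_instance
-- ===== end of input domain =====

-- B rewrites A's while-loop + final reversal as a recursion on the quotient that
-- builds the string most-significant-first (objective: simpler, no reversal).

-- ===== PORT A =====
-- the while-loop of A; fuel only makes it total (the loop terminates for 0 ≤ n)
def solutionLoop : Nat → Int → String → String
  | 0, _, answer => answer
  | fuel+1, number, answer =>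
    if number = 0 then answer
    else
      let number_2 := PySem.Int.mod number 3
      let number' := if number_2 = 0 then PySem.Int.floordiv number 3 - 1
                     else PySem.Int.floordiv number 3
      let answer' := if number_2 = 1 then answer ++ "1"
                     else if number_2 = 2 then answer ++ "2"
                     else answer ++ "4"
      solutionLoop fuel number' answer'

def solution (n : Int) : String :=
  let answer := solutionLoop (n.toNat + 1) n ""
  (PySem.Str.slice? answer none none (-1)).getD ""   -- answer[::-1]

-- ===== PORT B =====
-- recursion of Source B; fuel only makes it total (terminates for 0 ≤ n)
def solutionAltRec : Nat → Int → String
  | 0, _ => ""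
  | fuel+1, n =>
    if n = 0 then ""
    else
      let r := PySem.Int.mod n 3
      if r = 0 then solutionAltRec fuel (PySem.Int.floordiv n 3 - 1) ++ "4"
      else solutionAltRec fuel (PySem.Int.floordiv n 3) ++ (if r = 1 then "1" else "2")

def solution_alt (n : Int) : String := solutionAltRec (n.toNat + 1) n

-- ===== PRECONDITION & SPEC =====
-- A's while-loop never terminates for negative n (number stays negative forever), so Pre_ is 0 ≤ n
def Pre_solution (n : Int) : Prop := 0 ≤ n
instance (n : Int) : Decidable (Pre_solution n) := by unfold Pre_solution; infer_instance
def pvWitness_solution : Int := (10)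

def Spec_solution (n : Int) (out : String) : Prop := out = solution_alt n
instance (n : Int) (out : String) : Decidable (Spec_solution n out) := by unfold Spec_solution; infer_instance

-- ===== CLAIM (what is proved, stated in full; the proofs are below) =====
def Claim_equal_solution : Prop := ∀ (n : Int), Dom_solution n → Pre_solution n → Spec_solution n (solution n)

-- ===== LEMMAS AND PROOFS =====

theorem pvFloordiv (n : Int) : PySem.Int.floordiv n 3 = n / 3 :=
  PySem.Int.floordiv_eq_ediv_of_pos (by norm_num)

theorem pvMod (n : Int) : PySem.Int.mod n 3 = n % 3 :=
  PySem.Int.mod_eq_emod_of_pos (by norm_num)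

-- the loop of A produces the answer of B, reversed, appended to the accumulator
theorem pvLoopRec (fuel : Nat) : ∀ (n : Int) (ans : String), 0 ≤ n → n.toNat < fuel →
    (solutionLoop fuel n ans).toList = ans.toList ++ (solutionAltRec fuel n).toList.reverse := by
  induction fuel with
  | zero => intro n ans _ h; omega
  | succ f ih =>
    intro n ans hn hf
    by_cases h0 : n = 0
    · simp [solutionLoop, solutionAltRec, h0]
    · have hpos : 0 < n := lt_of_le_of_ne hn (Ne.symm h0)
      rw [solutionLoop, solutionAltRec]
      simp only [if_neg h0]
      rw [pvFloordiv, pvMod]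
      have hr0 : 0 ≤ n % 3 := Int.emod_nonneg n (by norm_num)
      have hr3 : n % 3 < 3 := Int.emod_lt_of_pos n (by norm_num)
      have hdiv : 3 * (n / 3) + n % 3 = n := by have := Int.ediv_add_emod n 3; omega
      by_cases h1 : n % 3 = 1
      · have hnext : 0 ≤ n / 3 ∧ (n / 3).toNat < f := by omega
        rw [if_neg (by omega : ¬ n % 3 = 0), if_pos h1, if_neg (by omega : ¬ n % 3 = 0),
            if_pos h1, ih (n / 3) (ans ++ "1") hnext.1 hnext.2]
        simp
      · by_cases h2 : n % 3 = 2
        · have hnext : 0 ≤ n / 3 ∧ (n / 3).toNat < f := by omega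
          rw [if_neg (by omega : ¬ n % 3 = 0), if_neg h1, if_pos h2,
              if_neg (by omega : ¬ n % 3 = 0), if_neg h1,
              ih (n / 3) (ans ++ "2") hnext.1 hnext.2]
          simp
        · have h3 : n % 3 = 0 := by omega
          have hnext : 0 ≤ n / 3 - 1 ∧ (n / 3 - 1).toNat < f := by omega
          rw [if_pos h3, if_neg h1, if_neg h2, if_pos h3,
              ih (n / 3 - 1) (ans ++ "4") hnext.1 hnext.2]
          simp

theorem solution_spec : Claim_equal_solution := by
  intro n _ hpre
  unfold Spec_solution solution solution_alt
  simp only [PySem.Str.slice?_none_none_neg_one, Option.getD_some]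
  have h := pvLoopRec (n.toNat + 1) n "" hpre (by omega)
  apply String.toList_injective   -- compare as char lists
  simp [h]

-- ===== VERDICT (by name: the statement is the Claim_ definition above) =====
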